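-- pv_equiv track=rewrite | github.com/frshdjfry/SeqLab | data/cocopops.py | extract_kern_sequences
-- ===== SOURCE A (Python) =====
-- def extract_kern_sequences(kern_spine):
--     # Initialize an empty list to hold the sequences
--     sequences = []
--
--     # Temporary list to hold the current sequence of **kern values
--     current_sequence = []
--
--     # Iterate through each **kern value in the spine
--     for value in kern_spine:
--         # Check if the line is empty or consists only of whitespace characters
--         if value.strip() == '':
--             continue  # Skip empty lines
--
--         # Check if the line starts with '*>', marking the beginning of a new sequence
--         if value.startswith('*>'):
--             # If the current sequence is not empty, it means we've reached the end of a sequence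
--             if current_sequence:
--                 sequences.append(current_sequence)  # Add the completed sequence to the list
--                 current_sequence = []  # Reset the current sequence for the next one
--             continue  # Move on to the next line
--
--         # If the line is not a sequence marker or empty, add it to the current sequence
--         if (not value.startswith('*') and not value.startswith('=') and not value.startswith('.')
--                 and not value.startswith('1r')):
--             clean_value = value.replace('.', '').replace(';', '').replace(' ', '_').upper()
--             current_sequence.append(clean_value)
--
--     # After processing all lines, check if there's a sequence that hasn't been added yet
--     if current_sequence:
--         sequences.append(current_sequence)  # Add the last sequence to the list
--
--     return sequences
-- ===== SOURCE B (Python) =====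
-- def extract_kern_sequences(kern_spine):
--     # Phase 1: split the spine into raw segments at '*>' marker lines (markers discarded).
--     segments = [[]]
--     for value in kern_spine:
--         if value.startswith('*>'):
--             segments.append([])
--         else:
--             segments[-1].append(value)
--
--     # Phase 2: clean each segment, then keep only the non-empty cleaned segments.
--     def cleaned(segment):
--         return [v.replace('.', '').replace(';', '').replace(' ', '_').upper()
--                 for v in segment
--                 if v.strip() != '' and not v.startswith(('*', '=', '.', '1r'))]
--
--     return [c for c in map(cleaned, segments) if c]
-- ===== Notes on version B (the rewrite author's own statement) =====
-- stated objective: alternative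
-- what changed: Replaces A's single-pass accumulator with conditional flushes by a two-phase pipeline: first split the spine into raw segments at '*>' marker lines, then map a clean-and-filter comprehension over the segments and keep the non-empty results.
import Mathlib
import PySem

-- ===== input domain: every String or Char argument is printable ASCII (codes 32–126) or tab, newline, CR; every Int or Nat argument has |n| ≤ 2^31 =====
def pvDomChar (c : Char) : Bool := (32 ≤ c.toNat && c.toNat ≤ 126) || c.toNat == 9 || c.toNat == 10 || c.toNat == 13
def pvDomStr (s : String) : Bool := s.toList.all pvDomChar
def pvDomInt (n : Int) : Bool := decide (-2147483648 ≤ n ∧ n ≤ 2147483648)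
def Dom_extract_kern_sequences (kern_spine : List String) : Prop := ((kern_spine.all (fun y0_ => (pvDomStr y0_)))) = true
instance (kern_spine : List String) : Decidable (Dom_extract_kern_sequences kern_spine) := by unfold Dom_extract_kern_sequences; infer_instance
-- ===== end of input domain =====

-- B replaces A's single-pass accumulator-and-flush with a split-into-segments-then-clean-and-filter pipeline (same cost, different decomposition).

-- shared helper: value.replace('.','').replace(';','').replace(' ','_').upper()
def pvClean (v : String) : String :=
  PySem.Str.upper (PySem.Str.replace (PySem.Str.replace (PySem.Str.replace v "." "") ";" "") " " "_")

-- ===== PORT A =====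
def pvStepA (st : List (List String) × List String) (value : String) :
    List (List String) × List String :=
  if PySem.Str.strip value == "" then st
  else if PySem.Str.startswith value "*>" then
    (if st.2 ≠ [] then (st.1 ++ [st.2], []) else st)
  else if !PySem.Str.startswith value "*" && !PySem.Str.startswith value "="
          && !PySem.Str.startswith value "." && !PySem.Str.startswith value "1r" then
    (st.1, st.2 ++ [pvClean value])
  else st

def extract_kern_sequences (kern_spine : List String) : List (List String) :=
  let st := kern_spine.foldl pvStepA ([], [])
  if st.2 ≠ [] then st.1 ++ [st.2] else st.1

-- ===== PORT B =====
-- phase-1 step: segments[-1].append / segments.append([]) on a '*>' marker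
def pvStepB (st : List (List String) × List String) (v : String) :
    List (List String) × List String :=
  if PySem.Str.startswith v "*>" then (st.1 ++ [st.2], []) else (st.1, st.2 ++ [v])

-- the comprehension's filter condition
def pvKeep (v : String) : Bool :=
  !(PySem.Str.strip v == "")
    && !(PySem.Str.startswith v "*" || PySem.Str.startswith v "="
        || PySem.Str.startswith v "." || PySem.Str.startswith v "1r")

-- cleaned(segment)
def pvCleaned (segment : List String) : List String :=
  (segment.filter pvKeep).map pvClean

def extract_kern_sequences_alt (kern_spine : List String) : List (List String) :=
  let st := kern_spine.foldl pvStepB ([], [])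
  ((st.1 ++ [st.2]).map pvCleaned).filter (fun c => c ≠ [])

-- ===== PRECONDITION & SPEC =====
def Spec_extract_kern_sequences (kern_spine : List String) (out : List (List String)) : Prop := out = extract_kern_sequences_alt kern_spine
instance (kern_spine : List String) (out : List (List String)) : Decidable (Spec_extract_kern_sequences kern_spine out) := by unfold Spec_extract_kern_sequences; infer_instance

-- ===== CLAIM (what is proved, stated in full; the proofs are below) =====
def Claim_equal_extract_kern_sequences : Prop := ∀ (kern_spine : List String), Dom_extract_kern_sequences kern_spine → Spec_extract_kern_sequences kern_spine (extract_kern_sequences kern_spine)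

-- ===== LEMMAS AND PROOFS =====

-- map-clean-filter of a segment list
def pvFilt (segs : List (List String)) : List (List String) :=
  (segs.map pvCleaned).filter (fun c => c ≠ [])

lemma pvFilt_append (a b : List (List String)) : pvFilt (a ++ b) = pvFilt a ++ pvFilt b := by
  simp [pvFilt]

lemma pvFilt_single (cur : List String) :
    pvFilt [cur] = if pvCleaned cur ≠ [] then [pvCleaned cur] else [] := by
  simp [pvFilt, List.filter]
  split_ifs with h <;> simp_all

lemma pvCleaned_append (seg : List String) (v : String) :
    pvCleaned (seg ++ [v]) = pvCleaned seg ++ (if pvKeep v then [pvClean v] else []) := by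
  cases hk : pvKeep v <;> simp [pvCleaned, List.filter_append, List.filter, hk]

-- a line starting with '*>' is never whitespace-only
lemma pv_star_not_blank (v : String) (h : PySem.Str.startswith v "*>" = true) :
    PySem.Str.strip v ≠ "" := by
  simp only [PySem.Str.startswith, PySem.Chars.startswith, List.isPrefixOf_iff_prefix] at h
  obtain ⟨t, ht⟩ := h
  intro hc
  have hl : (PySem.Str.strip v).toList = [] := by rw [hc]; rfl
  rw [PySem.Str.toList_strip] at hl
  simp only [PySem.Chars.strip, PySem.Chars.rstrip, PySem.Chars.lstrip,
    List.reverse_eq_nil_iff, List.dropWhile_eq_nil_iff, List.mem_reverse] at hl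
  have hstar : '*' ∈ List.dropWhile PySem.Chars.isspace v.toList := by
    rw [← ht]
    simp [PySem.Chars.isspace]
  have := hl _ hstar
  simp [PySem.Chars.isspace] at this

-- the loop invariant: A's running state is the cleaned-and-filtered image of B's raw split state
lemma pv_key (lines : List String) : ∀ (done : List (List String)) (cur : List String),
    (let st := lines.foldl pvStepA (pvFilt done, pvCleaned cur)
     if st.2 ≠ [] then st.1 ++ [st.2] else st.1)
    = pvFilt ((lines.foldl pvStepB (done, cur)).1 ++ [(lines.foldl pvStepB (done, cur)).2]) := by
  induction lines with
  | nil =>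
    intro done cur
    simp only [List.foldl_nil, pvFilt_append, pvFilt_single]
    split_ifs <;> simp
  | cons v rest ih =>
    intro done cur
    cases hb : (PySem.Str.strip v == "") with
    | true =>
      -- blank line: A skips it, B stores it but cleaning drops it
      have hns : PySem.Str.startswith v "*>" = false := by
        by_contra h
        exact pv_star_not_blank v (by simpa using h) (by simpa using hb)
      have hA : pvStepA (pvFilt done, pvCleaned cur) v = (pvFilt done, pvCleaned cur) := by
        simp only [pvStepA, hb, if_true]
      have hB : pvStepB (done, cur) v = (done, cur ++ [v]) := by
        simp only [pvStepB, hns, Bool.false_eq_true, if_false]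
      have hc : pvCleaned (cur ++ [v]) = pvCleaned cur := by
        rw [pvCleaned_append]
        simp [pvKeep, hb]
      simpa [List.foldl_cons, hA, hB, hc] using ih done (cur ++ [v])
    | false =>
      cases hs : PySem.Str.startswith v "*>" with
      | true =>
        -- '*>' marker: A flushes a non-empty current sequence, B closes the raw segment
        have hA : pvStepA (pvFilt done, pvCleaned cur) v
            = (pvFilt (done ++ [cur]), pvCleaned []) := by
          simp only [pvStepA, hb, Bool.false_eq_true, if_false, hs, if_true]
          rw [pvFilt_append, pvFilt_single]
          split_ifs with h <;> simp_all [pvCleaned]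
        have hB : pvStepB (done, cur) v = (done ++ [cur], []) := by
          simp only [pvStepB, hs, if_true]
        simpa [List.foldl_cons, hA, hB] using ih (done ++ [cur]) []
      | false =>
        -- ordinary line: both add it to the current segment (cleaned now vs cleaned later)
        have hB : pvStepB (done, cur) v = (done, cur ++ [v]) := by
          simp only [pvStepB, hs, Bool.false_eq_true, if_false]
        cases h1 : PySem.Str.startswith v "*" <;> cases h2 : PySem.Str.startswith v "="
          <;> cases h3 : PySem.Str.startswith v "." <;> cases h4 : PySem.Str.startswith v "1r"
        all_goals (
          have hA : pvStepA (pvFilt done, pvCleaned cur) v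
              = (pvFilt done, pvCleaned (cur ++ [v])) := by
            rw [pvCleaned_append]
            simp only [pvStepA, pvKeep, hb, Bool.false_eq_true, if_false, hs, h1, h2, h3, h4]
            simp
          simpa [List.foldl_cons, hA, hB] using ih done (cur ++ [v]))

-- ===== VERDICT (by name: the statement is the Claim_ definition above) =====
theorem extract_kern_sequences_spec : Claim_equal_extract_kern_sequences := by
  intro ks _
  unfold Spec_extract_kern_sequences
  have h := pv_key ks [] []
  simp only [pvFilt, pvCleaned, List.filter_nil, List.map_nil] at h
  simpa [extract_kern_sequences, extract_kern_sequences_alt, pvFilt] using h
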